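-- pv_equiv track=rewrite | github.com/incenger/dsa_practice | google_kickstart/2021/h/a.py | solve
-- ===== SOURCE A (Python) =====
-- import string
--
-- lower = [c for c in string.ascii_lowercase]
--
-- def solve(s, f):
--     f = set([c for c in f])
--     ans = 0
--
--     for c in s:
--         i = lower.index(c)
--
--         k = 0
--         while True:
--             inc = (i + k) % 26
--             dec = ((i - k) + 26) % 26
--             if lower[inc] in f or lower[dec] in f:
--                 op = k
--                 break
--             k += 1
--         ans += op
--
--     return ans
-- ===== SOURCE B (Python) =====
-- import string
--
-- def solve(s, f):
--     fast = set(f)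
--     fi = [j for j in range(26) if string.ascii_lowercase[j] in fast]
--     dist = [min(min((j - i) % 26, (i - j) % 26) for j in fi) for i in range(26)]
--     return sum(dist[ord(c) - 97] for c in s)
-- ===== Notes on version B (the rewrite author's own statement) =====
-- stated objective: faster
-- what changed: B precomputes a 26-entry table of each letter's minimum circular distance to a fast letter via a closed-form min over fast indices, then sums O(1) table lookups, replacing A's per-character incremental ring search; Pre_ excludes inputs where A raises ValueError (a char of s not in lower) or loops forever (no lowercase letter in f with s nonempty), which also excludes the corner s='' with no lowercase in f, where A returns 0 but B's eager table build raises ValueError.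
-- outside the precondition, e.g. on solve('', ''): A returns 0, B raises ValueError; on solve('', '#'): A returns 0, B raises ValueError
import Mathlib
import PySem

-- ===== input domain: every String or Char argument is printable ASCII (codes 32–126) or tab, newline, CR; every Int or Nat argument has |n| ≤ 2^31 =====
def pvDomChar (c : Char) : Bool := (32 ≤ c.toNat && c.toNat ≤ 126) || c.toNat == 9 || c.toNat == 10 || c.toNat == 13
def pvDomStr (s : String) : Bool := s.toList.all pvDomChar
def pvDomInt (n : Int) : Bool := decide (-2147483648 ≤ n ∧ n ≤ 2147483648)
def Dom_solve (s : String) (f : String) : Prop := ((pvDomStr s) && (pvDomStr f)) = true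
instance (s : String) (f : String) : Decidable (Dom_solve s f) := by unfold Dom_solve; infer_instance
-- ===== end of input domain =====

-- B replaces A's per-character incremental ring search by a precomputed 26-entry
-- min-circular-distance table with a closed-form distance, then O(1) lookups (objective: faster, constant factor).

-- module constant: lower = [c for c in string.ascii_lowercase]
def pyLower : List Char :=
  ['a','b','c','d','e','f','g','h','i','j','k','l','m',
   'n','o','p','q','r','s','t','u','v','w','x','y','z']

-- ===== PORT A =====
-- the 'while True: k += 1' loop; fuel 26 is a totality guard only (under Pre_ the
-- first hit comes at k < 26; without a fast letter Python never terminates)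
def solveLoop (fset : PySem.Set Char) (i : Int) : Nat → Int → Int
  | 0, _ => 0
  | fuel+1, k =>
    let inc := PySem.Int.mod (i + k) 26
    let dec := PySem.Int.mod ((i - k) + 26) 26
    if fset.contains (PySem.List.pyGetD pyLower inc ' ') ||
       fset.contains (PySem.List.pyGetD pyLower dec ' ') then
      k
    else
      solveLoop fset i fuel (k + 1)

def solve (s : String) (f : String) : Int :=
  let fset : PySem.Set Char := PySem.Set.ofList f.toList
  s.toList.foldl (fun ans c =>
    match PySem.List.index? pyLower c with
    | none => ans            -- lower.index(c) raises ValueError here; excluded by Pre_solve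
    | some i => ans + solveLoop fset (i : Int) 26 0) 0

-- ===== PORT B =====
def solve_alt (s : String) (f : String) : Int :=
  let fast : PySem.Set Char := PySem.Set.ofList f.toList
  let fi : List Int := (PySem.List.pyRange 0 26 1).filter
    (fun j => fast.contains (PySem.List.pyGetD pyLower j ' '))
  let dist : List Int := (PySem.List.pyRange 0 26 1).map (fun i =>
    match fi.map (fun j => min (PySem.Int.mod (j - i) 26) (PySem.Int.mod (i - j) 26)) with
    | [] => 0                -- min() of an empty sequence raises ValueError; excluded by Pre_solve
    | x :: xs => xs.foldl min x)
  (s.toList.map (fun c => PySem.List.pyGetD dist ((c.toNat : Int) - 97) 0)).sum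

-- ===== PRECONDITION & SPEC =====
-- Pre_ requires every char of s to be a lowercase letter (A raises ValueError otherwise)
-- and f to contain a lowercase letter (A's while-loop never terminates otherwise for
-- nonempty s); this also excludes the corner where s is empty and f has no lowercase
-- letter, on which A returns 0 but B's table construction raises ValueError.
def Pre_solve (s : String) (f : String) : Prop :=
  (s.toList.all (fun c => 97 ≤ c.toNat && c.toNat ≤ 122)) = true ∧
  (f.toList.any (fun c => 97 ≤ c.toNat && c.toNat ≤ 122)) = true
instance (s : String) (f : String) : Decidable (Pre_solve s f) := by
  unfold Pre_solve; infer_instance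

def pvWitness_solve : String × String := ("ab", "qb")

def Spec_solve (s : String) (f : String) (out : Int) : Prop := out = solve_alt s f
instance (s : String) (f : String) (out : Int) : Decidable (Spec_solve s f out) := by
  unfold Spec_solve; infer_instance

-- ===== CLAIM (what is proved, stated in full; the proofs are below) =====
def Claim_equal_solve : Prop := ∀ (s : String) (f : String), Dom_solve s f → Pre_solve s f → Spec_solve s f (solve s f)

-- ===== LEMMAS AND PROOFS =====

theorem mod26 (a : Int) : PySem.Int.mod a 26 = a % 26 :=
  PySem.Int.mod_eq_emod_of_pos (by norm_num)

-- the 26 letters, identified by their codes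
theorem pyLower_getElem_toNat : ∀ n (h : n < pyLower.length), (pyLower[n]).toNat = 97 + n := by
  decide

theorem char_eq_pyLower (c : Char) (h1 : 97 ≤ c.toNat) (h2 : c.toNat ≤ 122) :
    ∀ (h : c.toNat - 97 < pyLower.length), pyLower[c.toNat - 97] = c := by
  intro h
  have ht : (pyLower[c.toNat - 97]).toNat = c.toNat := by
    rw [pyLower_getElem_toNat _ h]; omega
  calc pyLower[c.toNat - 97] = Char.ofNat (pyLower[c.toNat - 97]).toNat :=
        (Char.ofNat_toNat _).symm
    _ = Char.ofNat c.toNat := by rw [ht]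
    _ = c := Char.ofNat_toNat c

theorem nodup_pyLower : pyLower.Nodup := by decide

theorem index?_pyLower (c : Char) (h1 : 97 ≤ c.toNat) (h2 : c.toNat ≤ 122) :
    PySem.List.index? pyLower c = some (c.toNat - 97) := by
  have hlt : c.toNat - 97 < pyLower.length := by simp [pyLower]; omega
  have hc := char_eq_pyLower c h1 h2 hlt
  rw [PySem.List.index?_eq_some_iff]
  refine ⟨pyLower.take (c.toNat - 97), pyLower.drop (c.toNat - 97 + 1), ?_, ?_, ?_⟩
  · conv_lhs => rw [← List.take_append_drop (c.toNat - 97) pyLower]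
    rw [List.drop_eq_getElem_cons hlt, hc]
  · simp [pyLower]; omega
  · intro hmem
    obtain ⟨j, hj, hje⟩ := List.getElem_of_mem hmem
    have hjlt : j < c.toNat - 97 := by
      have := hj; simp [List.length_take] at this; omega
    rw [List.getElem_take] at hje
    have := nodup_pyLower
    have : j = c.toNat - 97 := by
      have h' : pyLower[j]'(by omega) = pyLower[c.toNat - 97]'hlt := by rw [hje, hc]
      exact nodup_pyLower.getElem_inj_iff.mp h'
    omega

-- fold-min over Int lists: membership and lower bound
theorem foldl_min_mem (xs : List Int) (x : Int) : xs.foldl min x ∈ x :: xs := by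
  induction xs generalizing x with
  | nil => simp
  | cons y ys ih =>
    rw [List.foldl_cons]
    rcases List.mem_cons.mp (ih (min x y)) with h | h
    · rcases min_choice x y with hc | hc
      · rw [h, hc]; exact List.mem_cons_self
      · rw [h, hc]; exact List.mem_cons_of_mem _ List.mem_cons_self
    · exact List.mem_cons_of_mem _ (List.mem_cons_of_mem _ h)

theorem foldl_min_le_init (xs : List Int) (x : Int) : xs.foldl min x ≤ x := by
  induction xs generalizing x with
  | nil => simp
  | cons z zs ih => exact le_trans (ih (min x z)) (min_le_left _ _)

theorem foldl_min_le_mem (xs : List Int) (y : Int) (h : y ∈ xs) : ∀ x, xs.foldl min x ≤ y := by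
  induction xs with
  | nil => simp at h
  | cons z zs ih =>
    intro x
    rw [List.foldl_cons]
    rcases List.mem_cons.mp h with h2 | h2
    · subst h2; exact le_trans (foldl_min_le_init zs (min x y)) (min_le_right _ _)
    · exact ih h2 (min x z)

theorem foldl_min_le (xs : List Int) (x y : Int) (h : y ∈ x :: xs) : xs.foldl min x ≤ y := by
  rcases List.mem_cons.mp h with h1 | h1
  · subst h1; exact foldl_min_le_init xs y
  · exact foldl_min_le_mem xs y h1 x

-- the while-loop returns the least k ≥ start satisfying its test
theorem solveLoop_eq (fset : PySem.Set Char) (i : Int) :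
    ∀ (fuel : Nat) (k d : Int), k ≤ d → d < k + fuel →
    (fset.contains (PySem.List.pyGetD pyLower (PySem.Int.mod (i + d) 26) ' ') ||
     fset.contains (PySem.List.pyGetD pyLower (PySem.Int.mod ((i - d) + 26) 26) ' ')) = true →
    (∀ j, k ≤ j → j < d →
      (fset.contains (PySem.List.pyGetD pyLower (PySem.Int.mod (i + j) 26) ' ') ||
       fset.contains (PySem.List.pyGetD pyLower (PySem.Int.mod ((i - j) + 26) 26) ' ')) = false) →
    solveLoop fset i fuel k = d := by
  intro fuel
  induction fuel with
  | zero => intro k d h1 h2 _ _; exfalso; omega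
  | succ n ih =>
    intro k d h1 h2 hd hlt
    rw [solveLoop]
    by_cases hk : k = d
    · subst hk; simp only [hd]; rfl
    · have hkd : k < d := by omega
      have : (fset.contains (PySem.List.pyGetD pyLower (PySem.Int.mod (i + k) 26) ' ') ||
              fset.contains (PySem.List.pyGetD pyLower (PySem.Int.mod ((i - k) + 26) 26) ' ')) = false :=
        hlt k (le_refl k) hkd
      simp only [this]
      exact ih (k + 1) d (by omega) (by omega) hd (fun j hj1 hj2 => hlt j (by omega) hj2)

-- per-letter value: A's search equals B's table entry
theorem perChar (f : String) (i : Int) (hi0 : 0 ≤ i) (_hi1 : i < 26)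
    (hf : ∃ c ∈ f.toList, 97 ≤ c.toNat ∧ c.toNat ≤ 122) :
    solveLoop (PySem.Set.ofList f.toList) i 26 0 =
      (match ((PySem.List.pyRange 0 26 1).filter
          (fun j => (PySem.Set.ofList f.toList).contains (PySem.List.pyGetD pyLower j ' '))).map
          (fun j => min (PySem.Int.mod (j - i) 26) (PySem.Int.mod (i - j) 26)) with
        | [] => 0
        | x :: xs => xs.foldl min x) := by
  set fset := PySem.Set.ofList f.toList with hfset
  set q : Int → Bool := fun j => fset.contains (PySem.List.pyGetD pyLower j ' ') with hq
  set h : Int → Int := fun j => min (PySem.Int.mod (j - i) 26) (PySem.Int.mod (i - j) 26) with hh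
  -- membership in the filtered index list
  have hmemfi : ∀ j : Int, j ∈ (PySem.List.pyRange 0 26 1).filter q ↔ (0 ≤ j ∧ j < 26) ∧ q j = true := by
    intro j
    rw [List.mem_filter, PySem.List.mem_pyRange_one]
  -- q holds at the index of any lowercase letter of f
  have hq_of_mem : ∀ c' ∈ f.toList, 97 ≤ c'.toNat → c'.toNat ≤ 122 →
      q ((c'.toNat : Int) - 97) = true := by
    intro c' hc' hb1 hb2
    have h0 : (0:Int) ≤ (c'.toNat : Int) - 97 := by omega
    have h1 : (c'.toNat : Int) - 97 < (pyLower.length : Int) := by simp [pyLower]; omega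
    have hget : PySem.List.pyGetD pyLower ((c'.toNat : Int) - 97) ' ' = c' := by
      rw [PySem.List.pyGetD_eq_getElem pyLower ' ' h0 h1]
      have : ((c'.toNat : Int) - 97).toNat = c'.toNat - 97 := by omega
      simp only [this]
      exact char_eq_pyLower c' hb1 hb2 _
    rw [hq]
    simp only [hget]
    exact (PySem.Set.contains_iff _ _).mpr ((PySem.Set.mem_ofList _ _).mpr hc')
  obtain ⟨c', hc'f, hb1, hb2⟩ := hf
  have hj0 : ((c'.toNat : Int) - 97) ∈ (PySem.List.pyRange 0 26 1).filter q :=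
    (hmemfi _).mpr ⟨by omega, hq_of_mem c' hc'f hb1 hb2⟩
  rcases hfi : (PySem.List.pyRange 0 26 1).filter q with _ | ⟨y, ys⟩
  · rw [hfi] at hj0; simp at hj0
  · simp only [List.map_cons]
    set r : Int := (ys.map h).foldl min (h y) with hr
    -- r is h j for some admitted j
    have hrmem : r ∈ (y :: ys).map h := by
      rw [List.map_cons]; exact foldl_min_mem (ys.map h) (h y)
    obtain ⟨j, hjmem, hjr⟩ := List.mem_map.mp hrmem
    have hjfi : (0 ≤ j ∧ j < 26) ∧ q j = true := (hmemfi j).mp (hfi ▸ hjmem)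
    -- r is a lower bound of all h j' with admitted j'
    have hrle : ∀ j' : Int, (0 ≤ j' ∧ j' < 26) → q j' = true → r ≤ h j' := by
      intro j' hj'b hj'q
      have : j' ∈ (PySem.List.pyRange 0 26 1).filter q := (hmemfi j').mpr ⟨hj'b, hj'q⟩
      rw [hfi] at this
      exact foldl_min_le (ys.map h) (h y) (h j') (by
        rw [← List.map_cons]; exact List.mem_map_of_mem this)
    have hrb : 0 ≤ r ∧ r < 26 := by
      rw [← hjr]; simp only [hh, mod26, le_min_iff, min_lt_iff]; omega
    -- the loop test succeeds at r
    have hhit : (fset.contains (PySem.List.pyGetD pyLower (PySem.Int.mod (i + r) 26) ' ') ||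
        fset.contains (PySem.List.pyGetD pyLower (PySem.Int.mod ((i - r) + 26) 26) ' ')) = true := by
      rcases le_total (PySem.Int.mod (j - i) 26) (PySem.Int.mod (i - j) 26) with hle | hle
      · have hrv : r = PySem.Int.mod (j - i) 26 := by rw [← hjr]; simp only [hh]; exact min_eq_left hle
        have : PySem.Int.mod (i + r) 26 = j := by
          rw [hrv]; simp only [mod26]; omega
        have hqj : fset.contains (PySem.List.pyGetD pyLower j ' ') = true := hjfi.2
        rw [this]; simp only [Bool.or_eq_true]; exact Or.inl hqj
      · have hrv : r = PySem.Int.mod (i - j) 26 := by rw [← hjr]; simp only [hh]; exact min_eq_right hle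
        have : PySem.Int.mod ((i - r) + 26) 26 = j := by
          rw [hrv]; simp only [mod26]; omega
        have hqj : fset.contains (PySem.List.pyGetD pyLower j ' ') = true := hjfi.2
        rw [this]; simp only [Bool.or_eq_true]; exact Or.inr hqj
    -- the loop test fails below r
    have hmiss : ∀ k, 0 ≤ k → k < r →
        (fset.contains (PySem.List.pyGetD pyLower (PySem.Int.mod (i + k) 26) ' ') ||
         fset.contains (PySem.List.pyGetD pyLower (PySem.Int.mod ((i - k) + 26) 26) ' ')) = false := by
      intro k hk0 hkr
      by_contra hcon
      simp only [Bool.not_eq_false, Bool.or_eq_true] at hcon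
      rcases hcon with ha | ha
      · set j' := PySem.Int.mod (i + k) 26 with hj'
        have hj'b : 0 ≤ j' ∧ j' < 26 := by rw [hj', mod26]; omega
        have hle := hrle j' hj'b ha
        have : h j' ≤ k := by
          simp only [hh]
          refine le_trans (min_le_left _ _) ?_
          rw [mod26]
          rw [hj', mod26]
          omega
        omega
      · set j' := PySem.Int.mod ((i - k) + 26) 26 with hj'
        have hj'b : 0 ≤ j' ∧ j' < 26 := by rw [hj', mod26]; omega
        have hle := hrle j' hj'b ha
        have : h j' ≤ k := by
          simp only [hh]
          refine le_trans (min_le_right _ _) ?_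
          rw [mod26]
          rw [hj', mod26]
          omega
        omega
    exact solveLoop_eq fset i 26 0 r hrb.1 (by omega) hhit (fun j hj1 hj2 => hmiss j hj1 hj2)

-- ===== VERDICT (by name: the statement is the Claim_ definition above) =====
theorem solve_spec : Claim_equal_solve := by
  intro s f _ hpre
  obtain ⟨hsb, hfb⟩ := hpre
  have hs : ∀ c ∈ s.toList, 97 ≤ c.toNat ∧ c.toNat ≤ 122 := by
    intro c hc; have := List.all_eq_true.mp hsb c hc; simpa using this
  have hf : ∃ c ∈ f.toList, 97 ≤ c.toNat ∧ c.toNat ≤ 122 := by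
    obtain ⟨c, hc, hb⟩ := List.any_eq_true.mp hfb; exact ⟨c, hc, by simpa using hb⟩
  unfold Spec_solve
  have hA : solve s f =
      (s.toList.map (fun c => solveLoop (PySem.Set.ofList f.toList) ((c.toNat : Int) - 97) 26 0)).sum := by
    simp only [solve]
    rw [PySem.List.foldl_congr_mem s.toList _
      (fun ans c => ans + solveLoop (PySem.Set.ofList f.toList) ((c.toNat : Int) - 97) 26 0) 0 ?_]
    · rw [PySem.List.foldl_add]; simp
    · intro acc c hc
      obtain ⟨h1, h2⟩ := hs c hc
      rw [index?_pyLower c h1 h2]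
      simp only []
      congr 2
      omega
  have hB : solve_alt s f =
      (s.toList.map (fun c =>
        (match ((PySem.List.pyRange 0 26 1).filter
            (fun j => (PySem.Set.ofList f.toList).contains (PySem.List.pyGetD pyLower j ' '))).map
            (fun j => min (PySem.Int.mod (j - ((c.toNat : Int) - 97)) 26)
                          (PySem.Int.mod (((c.toNat : Int) - 97) - j) 26)) with
          | [] => 0
          | x :: xs => xs.foldl min x))).sum := by
    simp only [solve_alt]
    congr 1
    refine List.map_congr_left ?_
    intro c hc
    obtain ⟨h1, h2⟩ := hs c hc
    rw [PySem.List.pyGetD_map_pyRange_of_nonneg _ 26 ((c.toNat : Int) - 97) 0 (by omega) (by omega)]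
  rw [hA, hB]
  congr 1
  refine List.map_congr_left ?_
  intro c hc
  obtain ⟨h1, h2⟩ := hs c hc
  exact perChar f ((c.toNat : Int) - 97) (by omega) (by omega) hf
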